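-- pv_equiv track=rewrite | github.com/Krasipeace/SoftUni | Algorithms with Python/05. Graph Theory, Traversal and Topological Sorting - Exercise/03. Salaries.py | calculate_salary
-- ===== SOURCE A (Python) =====
-- def calculate_salary(node, graph, salaries):
--     if salaries[node] is not None:
--         return salaries[node]
--
--     if not graph[node]:
--         salaries[node] = 1
--
--         return 1
--
--     salaries[node] = sum(calculate_salary(child, graph, salaries) for child in graph[node])
--
--     return salaries[node]
-- ===== SOURCE B (Python) =====
-- def calculate_salary(node, graph, salaries):
--     # Two-phase iterative computation instead of A's memoized recursion:
--     # (1) collect the region of uncomputed nodes reachable from `node`,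
--     # (2) run fixed-point sweeps over that region until every node is valued.
--     # Does not mutate `salaries` (A does); the return value is the same.
--     if salaries[node] is not None:
--         return salaries[node]
--     region = [node]
--     frontier = [node]
--     while frontier:
--         n = frontier.pop()
--         for c in graph[n]:
--             if salaries[c] is None and c not in region:
--                 region.append(c)
--                 frontier.append(c)
--     vals = {}
--     changed = True
--     while changed:
--         changed = False
--         for n in region:
--             if n in vals:
--                 continue
--             children = graph[n]
--             if not children:
--                 vals[n] = 1
--                 changed = True
--             else:
--                 cv = [salaries[c] if salaries[c] is not None else vals.get(c)
--                       for c in children]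
--                 if None not in cv:
--                     vals[n] = sum(cv)
--                     changed = True
--     return vals[node]
-- ===== Notes on version B (the rewrite author's own statement) =====
-- stated objective: alternative
-- what changed: A's top-down memoized recursion (which mutates the salaries cache in place) is replaced by a two-phase iterative algorithm: first an explicit-worklist collection of the uncomputed nodes reachable from `node`, then fixed-point sweeps over that region that value a node once all its children are valued; B never mutates `salaries`.
-- outside the precondition, e.g. on calculate_salary(0, {0: [-3, 1], -3: [], 1: [2, 2], 2: []}, [None, None, None, None]): A returns 2, B returns 3; on calculate_salary(0, {-1: [], 0: [-1, 0, -1]}, [None]): A returns 3, B raises KeyError; on calculate_salary(0, {0: [-2], -2: []}, [None, None]): A returns 1, B returns 1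
import Mathlib
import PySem

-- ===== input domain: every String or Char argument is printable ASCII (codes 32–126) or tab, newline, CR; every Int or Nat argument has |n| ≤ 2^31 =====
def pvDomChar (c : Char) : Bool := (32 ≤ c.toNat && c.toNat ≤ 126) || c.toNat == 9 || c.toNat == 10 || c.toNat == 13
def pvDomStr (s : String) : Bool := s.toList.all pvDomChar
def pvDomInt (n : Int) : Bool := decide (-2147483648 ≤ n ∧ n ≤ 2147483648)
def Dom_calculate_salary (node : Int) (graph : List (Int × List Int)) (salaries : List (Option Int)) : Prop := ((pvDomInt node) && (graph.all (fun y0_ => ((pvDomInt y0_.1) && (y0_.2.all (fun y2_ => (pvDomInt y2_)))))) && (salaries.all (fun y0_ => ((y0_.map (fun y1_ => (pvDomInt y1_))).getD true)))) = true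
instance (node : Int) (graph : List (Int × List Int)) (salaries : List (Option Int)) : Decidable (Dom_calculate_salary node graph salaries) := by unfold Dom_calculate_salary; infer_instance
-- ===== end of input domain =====

-- B replaces A's top-down memoized recursion by a two-phase iterative algorithm (explicit-worklist
-- region collection, then fixed-point sweeps over that region): alternative algorithm, same return
-- value; A mutates `salaries`, B does not — the equivalence proved here is about the RETURN value only.


-- shared helpers: graph.flatMap-edge count (fuel bounds) and the dict lookup graph[n]
def pvE (graph : List (Int × List Int)) : Nat := (graph.flatMap Prod.snd).length
def pvG (graph : List (Int × List Int)) (n : Int) : Option (List Int) :=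
  PySem.Dict.get? (PySem.Dict.mk graph) n

-- ===== PORT A =====
-- A's memoized recursion, with the mutated `salaries` list threaded through explicitly and
-- fuel bounding the recursion depth (under Pre_ the depth is < pvE graph + 2, proved below).
mutual
def pvCalcA (g : PySem.Dict Int (List Int)) : Nat → Int → List (Option Int) → Option (Int × List (Option Int))
  | 0, _, _ => none
  | fuel+1, node, s =>
    match PySem.List.pyGet? s node with            -- salaries[node]  (none = IndexError)
    | none => none
    | some (some v) => some (v, s)                 -- cached: return it
    | some none =>
      match PySem.Dict.get? g node with            -- graph[node]  (none = KeyError)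
      | none => none
      | some [] =>
        match PySem.List.pySet? s node (some 1) with   -- salaries[node] = 1
        | none => none
        | some s1 => some (1, s1)
      | some (c :: cs) =>
        match pvSumA g fuel 0 (c :: cs) s with     -- sum(calculate_salary(child, …) for child …)
        | none => none
        | some (t, s1) =>
          match PySem.List.pySet? s1 node (some t) with  -- salaries[node] = sum
          | none => none
          | some s2 => some (t, s2)
  termination_by fuel _ _ => (fuel, 0)
def pvSumA (g : PySem.Dict Int (List Int)) : Nat → Int → List Int → List (Option Int) → Option (Int × List (Option Int))
  | _, acc, [], s => some (acc, s)
  | fuel, acc, c :: cs, s =>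
    match pvCalcA g fuel c s with
    | none => none
    | some (v, s1) => pvSumA g fuel (acc + v) cs s1
  termination_by fuel _ cs _ => (fuel, cs.length + 1)
end

def calculate_salary (node : Int) (graph : List (Int × List Int)) (salaries : List (Option Int)) : Int :=
  match pvCalcA (PySem.Dict.mk graph) (pvE graph + 2) node salaries with
  | some (v, _) => v
  | none => 0        -- fuel exhaustion / IndexError / KeyError / RecursionError: outside Pre_

-- ===== PORT B =====
-- Source B phase 1: worklist collection of the uncomputed nodes reachable from `node`
def pvRegionPush (s : List (Option Int)) (st : List Int × List Int) (c : Int) : List Int × List Int :=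
  if (PySem.List.pyGet? s c == some none) && !(st.1.contains c) then (st.1 ++ [c], c :: st.2) else st

def pvRegion (graph : List (Int × List Int)) (s : List (Option Int)) : Nat → List Int → List Int → Option (List Int)
  | 0, _, _ => none
  | _+1, region, [] => some region
  | f+1, region, n :: fr =>
    match pvG graph n with                         -- graph[n]  (none = KeyError)
    | none => none
    | some cs =>
      let st := cs.foldl (pvRegionPush s) (region, fr)
      pvRegion graph s f st.1 st.2

-- Source B phase 2: one sweep entry — value a node whose children are all available
def pvChildVal (s : List (Option Int)) (vals : PySem.Dict Int Int) (c : Int) : Option Int :=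
  match PySem.List.pyGet? s c with                 -- salaries[c]  (none = IndexError)
  | some (some v) => some v
  | some none => PySem.Dict.get? vals c            -- vals.get(c)
  | none => none

def pvSweepStep (graph : List (Int × List Int)) (s : List (Option Int))
    (st : PySem.Dict Int Int × Bool) (n : Int) : PySem.Dict Int Int × Bool :=
  if (PySem.Dict.get? st.1 n).isSome then st       -- n in vals: continue
  else match pvG graph n with
  | none => st                                     -- KeyError: outside Pre_
  | some [] => (PySem.Dict.insert st.1 n 1, true)  -- leaf: vals[n] = 1
  | some (c :: cs) =>
    match (c :: cs).mapM (pvChildVal s st.1) with  -- cv; None not in cv?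
    | none => st
    | some vs => (PySem.Dict.insert st.1 n vs.sum, true)   -- vals[n] = sum(cv)

def pvLoopB (graph : List (Int × List Int)) (s : List (Option Int)) (region : List Int) :
    Nat → PySem.Dict Int Int → PySem.Dict Int Int
  | 0, d => d
  | f+1, d =>
    match region.foldl (pvSweepStep graph s) (d, false) with
    | (d1, true) => pvLoopB graph s region f d1
    | (d1, false) => d1
-- fuel region.length + 1 always suffices: each changed sweep strictly grows vals (proved below)

def calculate_salary_alt (node : Int) (graph : List (Int × List Int)) (salaries : List (Option Int)) : Int :=
  match PySem.List.pyGet? salaries node with       -- salaries[node]  (none = IndexError)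
  | none => 0                                      -- IndexError: outside Pre_
  | some (some v) => v
  | some none =>
    match pvRegion graph salaries (pvE graph + 2) [node] [node] with
    | none => 0                                    -- KeyError in the worklist loop: outside Pre_
    | some region =>
      (PySem.Dict.get? (pvLoopB graph salaries region (region.length + 1) PySem.Dict.empty) node).getD 0
      -- vals[node]; KeyError → 0: outside Pre_

-- ===== PRECONDITION & SPEC =====
-- pvRset = the set of uncomputed nodes A's recursion actually expands (closure of {node} under
-- uncomputed children); pvMu n = number of uncomputed nodes strictly below n (for acyclicity).
def pvCh (graph : List (Int × List Int)) (n : Int) : List Int := (pvG graph n).getD []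
def pvKids2 (graph : List (Int × List Int)) (s : List (Option Int)) (n : Int) : List Int :=
  (pvCh graph n).filter (fun c => PySem.List.pyGet? s c == some none)
def pvStep (graph : List (Int × List Int)) (s : List (Option Int)) (S : Finset Int) : Finset Int :=
  S ∪ S.biUnion (fun n => (pvKids2 graph s n).toFinset)
def pvRset (node : Int) (graph : List (Int × List Int)) (s : List (Option Int)) : Finset Int :=
  (pvStep graph s)^[pvE graph + 2] {node}
def pvMu (graph : List (Int × List Int)) (s : List (Option Int)) (n : Int) : Nat :=
  ((pvStep graph s)^[pvE graph + 2] (pvKids2 graph s n).toFinset).card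

-- Pre_ admits every in-range start node whose salary is preset; when salaries[node] is None it
-- requires, ONLY along the region A actually traverses (pvRset), that every expanded node is a
-- graph key, every visited child indexes into `salaries`, the traversed subgraph is acyclic
-- (else A raises KeyError / IndexError / RecursionError), and that no two distinct traversed node
-- labels alias the same salary cell via negative-index wraparound — on aliasing inputs A still
-- returns, but its value is an artefact of its in-place cache mutations (see claim cites).
def Pre_calculate_salary (node : Int) (graph : List (Int × List Int)) (salaries : List (Option Int)) : Prop :=
  PySem.Raise.InRange salaries.length node ∧
  (PySem.List.pyGet? salaries node = some none →
    (∀ n ∈ pvRset node graph salaries,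
        pvG graph n ≠ none ∧
        (∀ c ∈ pvCh graph n, PySem.Raise.InRange salaries.length c) ∧
        (∀ c ∈ pvKids2 graph salaries n, pvMu graph salaries c < pvMu graph salaries n)) ∧
    (∀ n ∈ pvRset node graph salaries, ∀ m ∈ pvRset node graph salaries,
        PySem.List.pyIdx? salaries.length n = PySem.List.pyIdx? salaries.length m → n = m))
instance (node : Int) (graph : List (Int × List Int)) (salaries : List (Option Int)) : Decidable (Pre_calculate_salary node graph salaries) := by unfold Pre_calculate_salary; infer_instance

def pvWitness_calculate_salary : Int × (List (Int × List Int)) × List (Option Int) :=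
  (0, [(0, [1]), (1, [])], [none, none])

def Spec_calculate_salary (node : Int) (graph : List (Int × List Int)) (salaries : List (Option Int)) (out : Int) : Prop := out = calculate_salary_alt node graph salaries
instance (node : Int) (graph : List (Int × List Int)) (salaries : List (Option Int)) (out : Int) : Decidable (Spec_calculate_salary node graph salaries out) := by unfold Spec_calculate_salary; infer_instance

-- ===== CLAIM (what is proved, stated in full; the proofs are below) =====
def Claim_equal_calculate_salary : Prop := ∀ (node : Int) (graph : List (Int × List Int)) (salaries : List (Option Int)), Dom_calculate_salary node graph salaries → Pre_calculate_salary node graph salaries → Spec_calculate_salary node graph salaries (calculate_salary node graph salaries)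

-- ===== LEMMAS AND PROOFS =====

-- index bridges
theorem pvIdx_lt {L : Nat} {i : Int} {j : Nat} (h : PySem.List.pyIdx? L i = some j) : j < L := by
  unfold PySem.List.pyIdx? at h
  split_ifs at h with h1 h2 h3
  all_goals try injection h with h
  all_goals omega

theorem pvIdx_ex {L : Nat} {i : Int} (h : PySem.Raise.InRange L i) :
    ∃ j, PySem.List.pyIdx? L i = some j := by
  obtain ⟨h1, h2⟩ := h
  unfold PySem.List.pyIdx?
  split_ifs with ha
  all_goals exact ⟨_, rfl⟩

theorem pvGet_idx {α : Type} (xs : List α) {i : Int} {j : Nat}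
    (h : PySem.List.pyIdx? xs.length i = some j) : PySem.List.pyGet? xs i = xs[j]? := by
  simp [PySem.List.pyGet?, h]

theorem pvSet_idx {α : Type} (xs : List α) {i : Int} {j : Nat} (v : α)
    (h : PySem.List.pyIdx? xs.length i = some j) :
    PySem.List.pySet? xs i v = some (xs.set j v) := by
  simp [PySem.List.pySet?, h]

-- graph-lookup facts
theorem pvG_mem {graph : List (Int × List Int)} {n : Int} {cs : List Int}
    (h : pvG graph n = some cs) : (n, cs) ∈ graph := by
  unfold pvG PySem.Dict.get? at h
  cases hf : List.find? (fun p => p.1 == n) (PySem.Dict.mk graph).items with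
  | none => rw [hf] at h; simp at h
  | some p =>
    rw [hf] at h
    simp at h
    have hp := List.mem_of_find?_eq_some hf
    have hpn : p.1 = n := by have := List.find?_some hf; simpa using this
    have : p = (n, cs) := by cases p; simp_all
    rw [this] at hp
    exact hp

-- universe / closure machinery
def pvU0 (graph : List (Int × List Int)) : Finset Int := (graph.flatMap Prod.snd).toFinset

theorem pvU0_card (graph : List (Int × List Int)) : (pvU0 graph).card ≤ pvE graph :=
  List.toFinset_card_le _

theorem pvKids2_sub_U0 (graph : List (Int × List Int)) (s : List (Option Int)) (n c : Int)
    (h : c ∈ pvKids2 graph s n) : c ∈ pvU0 graph := by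
  have hc : c ∈ pvCh graph n := List.mem_of_mem_filter h
  unfold pvCh at hc
  cases hd : pvG graph n with
  | none => rw [hd] at hc; simp at hc
  | some cs =>
    rw [hd] at hc
    simp only [Option.getD_some] at hc
    have := pvG_mem hd
    unfold pvU0
    rw [List.mem_toFinset, List.mem_flatMap]
    exact ⟨(n, cs), this, hc⟩

theorem pvStep_sub (graph : List (Int × List Int)) (s : List (Option Int)) {S U : Finset Int}
    (hU0 : pvU0 graph ⊆ U) (hS : S ⊆ U) : pvStep graph s S ⊆ U := by
  unfold pvStep
  apply Finset.union_subset hS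
  intro x hx
  rw [Finset.mem_biUnion] at hx
  obtain ⟨n, _, hxn⟩ := hx
  rw [List.mem_toFinset] at hxn
  exact hU0 (pvKids2_sub_U0 graph s n x hxn)

theorem pvIter_sub (graph : List (Int × List Int)) (s : List (Option Int)) {U : Finset Int}
    (hU0 : pvU0 graph ⊆ U) : ∀ (k : Nat) (a : Finset Int), a ⊆ U → (pvStep graph s)^[k] a ⊆ U := by
  intro k
  induction k with
  | zero => intro a h; simpa using h
  | succ m ih =>
    intro a h
    rw [Function.iterate_succ_apply']
    exact pvStep_sub graph s hU0 (ih a h)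

theorem pvIter_infl (graph : List (Int × List Int)) (s : List (Option Int)) :
    ∀ (k : Nat) (a : Finset Int), a ⊆ (pvStep graph s)^[k] a := by
  intro k
  induction k with
  | zero => intro a; simp
  | succ m ih =>
    intro a
    rw [Function.iterate_succ_apply']
    exact (ih a).trans Finset.subset_union_left

theorem pvIter_fixed (graph : List (Int × List Int)) (s : List (Option Int)) {U : Finset Int}
    (hU0 : pvU0 graph ⊆ U) {a : Finset Int} (ha : a ⊆ U) {N : Nat} (hN : U.card < N) :
    pvStep graph s ((pvStep graph s)^[N] a) = (pvStep graph s)^[N] a := by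
  have aux : ∀ k : Nat, pvStep graph s ((pvStep graph s)^[k] a) = (pvStep graph s)^[k] a ∨
      k ≤ ((pvStep graph s)^[k] a).card := by
    intro k
    induction k with
    | zero => exact Or.inr (Nat.zero_le _)
    | succ m ih =>
      rcases ih with hfix | hle
      · left
        rw [Function.iterate_succ_apply', hfix, hfix]
      · by_cases hf : pvStep graph s ((pvStep graph s)^[m] a) = (pvStep graph s)^[m] a
        · left
          rw [Function.iterate_succ_apply', hf, hf]
        · right
          rw [Function.iterate_succ_apply']
          have hsub : (pvStep graph s)^[m] a ⊆ pvStep graph s ((pvStep graph s)^[m] a) :=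
            Finset.subset_union_left
          have : ((pvStep graph s)^[m] a).card < (pvStep graph s ((pvStep graph s)^[m] a)).card :=
            Finset.card_lt_card (HasSubset.Subset.ssubset_of_ne hsub (Ne.symm hf))
          omega
  rcases aux N with hfix | hle
  · exact hfix
  · exfalso
    have hsub := pvIter_sub graph s hU0 N a ha
    have := Finset.card_le_card hsub
    omega

theorem pvRset_fixed (node : Int) (graph : List (Int × List Int)) (s : List (Option Int)) :
    pvStep graph s (pvRset node graph s) = pvRset node graph s := by
  apply pvIter_fixed graph s (U := insert node (pvU0 graph))
  · exact Finset.subset_insert _ _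
  · simp
  · have h1 := Finset.card_insert_le node (pvU0 graph)
    have h2 := pvU0_card graph
    omega

theorem pvRset_self (node : Int) (graph : List (Int × List Int)) (s : List (Option Int)) :
    node ∈ pvRset node graph s := by
  have := pvIter_infl graph s (pvE graph + 2) {node}
  exact this (Finset.mem_singleton_self node)

theorem pvRset_closed (node : Int) (graph : List (Int × List Int)) (s : List (Option Int))
    {n c : Int} (hn : n ∈ pvRset node graph s) (hc : c ∈ pvKids2 graph s n) :
    c ∈ pvRset node graph s := by
  rw [← pvRset_fixed node graph s]
  unfold pvStep
  apply Finset.mem_union_right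
  rw [Finset.mem_biUnion]
  exact ⟨n, hn, List.mem_toFinset.mpr hc⟩

theorem pvRset_card (node : Int) (graph : List (Int × List Int)) (s : List (Option Int)) :
    (pvRset node graph s).card ≤ pvE graph + 1 := by
  have hsub : pvRset node graph s ⊆ insert node (pvU0 graph) :=
    pvIter_sub graph s (Finset.subset_insert _ _) _ _ (by simp)
  have h1 := Finset.card_le_card hsub
  have h2 := Finset.card_insert_le node (pvU0 graph)
  have h3 := pvU0_card graph
  omega

theorem pvMu_le (graph : List (Int × List Int)) (s : List (Option Int)) (n : Int) :
    pvMu graph s n ≤ pvE graph := by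
  unfold pvMu
  have hsub : (pvStep graph s)^[pvE graph + 2] (pvKids2 graph s n).toFinset ⊆ pvU0 graph := by
    apply pvIter_sub graph s (Finset.Subset.refl _)
    intro c hc
    exact pvKids2_sub_U0 graph s n c (List.mem_toFinset.mp hc)
  have := Finset.card_le_card hsub
  have := pvU0_card graph
  omega

theorem pvKids2_mem (graph : List (Int × List Int)) (s : List (Option Int)) {n c : Int}
    (hch : c ∈ pvCh graph n) (hnone : PySem.List.pyGet? s c = some none) :
    c ∈ pvKids2 graph s n := by
  unfold pvKids2
  rw [List.mem_filter]
  exact ⟨hch, by simp [hnone]⟩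

-- the Pre_ payload, bundled
def pvOK (node : Int) (graph : List (Int × List Int)) (s : List (Option Int)) : Prop :=
  (∀ n ∈ pvRset node graph s,
      pvG graph n ≠ none ∧
      (∀ c ∈ pvCh graph n, PySem.Raise.InRange s.length c) ∧
      (∀ c ∈ pvKids2 graph s n, pvMu graph s c < pvMu graph s n)) ∧
  (∀ n ∈ pvRset node graph s, ∀ m ∈ pvRset node graph s,
      PySem.List.pyIdx? s.length n = PySem.List.pyIdx? s.length m → n = m)

-- the pure semantic value of A's recursion (fuel-indexed)
mutual
def pvVal (graph : List (Int × List Int)) (s0 : List (Option Int)) : Nat → Int → Option Int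
  | 0, _ => none
  | fuel+1, n =>
    match PySem.List.pyGet? s0 n with
    | none => none
    | some (some v) => some v
    | some none =>
      match pvG graph n with
      | none => none
      | some [] => some 1
      | some (c :: cs) => pvPSum graph s0 fuel 0 (c :: cs)
  termination_by fuel _ => (fuel, 0)
def pvPSum (graph : List (Int × List Int)) (s0 : List (Option Int)) : Nat → Int → List Int → Option Int
  | _, acc, [] => some acc
  | fuel, acc, c :: cs =>
    match pvVal graph s0 fuel c with
    | none => none
    | some v => pvPSum graph s0 fuel (acc + v) cs
  termination_by fuel _ cs => (fuel, cs.length + 1)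
end

theorem pvPSum_eq_mapM (graph : List (Int × List Int)) (s0 : List (Option Int)) (fuel : Nat) :
    ∀ (cs : List Int) (acc : Int),
      pvPSum graph s0 fuel acc cs = (cs.mapM (pvVal graph s0 fuel)).map (fun vs => acc + vs.sum) := by
  intro cs
  induction cs with
  | nil => intro acc; simp [pvPSum]
  | cons c cs ih =>
    intro acc
    cases hv : pvVal graph s0 fuel c with
    | none => simp [pvPSum, hv, List.mapM_cons]
    | some v =>
      simp only [pvPSum, hv, List.mapM_cons]
      rw [ih]
      cases hm : cs.mapM (pvVal graph s0 fuel) with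
      | none => simp
      | some vs => simp; ring

theorem pvVal_mono (graph : List (Int × List Int)) (s0 : List (Option Int)) :
    ∀ (fuel : Nat),
      (∀ n v, pvVal graph s0 fuel n = some v → pvVal graph s0 (fuel+1) n = some v) ∧
      (∀ cs acc v, pvPSum graph s0 fuel acc cs = some v → pvPSum graph s0 (fuel+1) acc cs = some v) := by
  intro fuel
  induction fuel with
  | zero =>
    constructor
    · intro n v h; simp [pvVal] at h
    · intro cs acc v h
      cases cs with
      | nil => simpa [pvPSum] using h
      | cons c cs => simp [pvPSum, pvVal] at h
  | succ f ih =>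
    have hval : ∀ n v, pvVal graph s0 (f+1) n = some v → pvVal graph s0 (f+1+1) n = some v := by
      intro n v h
      rw [pvVal] at h ⊢
      cases hg : PySem.List.pyGet? s0 n with
      | none => simp [hg] at h
      | some o =>
        cases o with
        | some w => simp only [hg] at h ⊢; exact h
        | none =>
          simp only [hg] at h ⊢
          cases hd : pvG graph n with
          | none => simp [hd] at h
          | some cs =>
            cases cs with
            | nil => simp only [hd] at h ⊢; exact h
            | cons c cs =>
              simp only [hd] at h ⊢
              exact ih.2 _ _ _ h
    refine ⟨hval, ?_⟩
    intro cs
    induction cs with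
    | nil => intro acc v h; simpa [pvPSum] using h
    | cons c cs ihc =>
      intro acc v h
      rw [pvPSum] at h ⊢
      cases hv : pvVal graph s0 (f+1) c with
      | none => simp [hv] at h
      | some w =>
        rw [hval c w hv]
        simp only [hv] at h
        exact ihc _ _ h

theorem pvVal_mono_le (graph : List (Int × List Int)) (s0 : List (Option Int))
    {f f' : Nat} (hle : f ≤ f') {n : Int} {v : Int}
    (h : pvVal graph s0 f n = some v) : pvVal graph s0 f' n = some v := by
  obtain ⟨k, rfl⟩ := Nat.exists_eq_add_of_le hle
  induction k with
  | zero => exact h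
  | succ m ih => exact (pvVal_mono graph s0 (f+m)).1 n v (ih (by omega))

theorem pvVal_preset (graph : List (Int × List Int)) (s0 : List (Option Int)) {c : Int} {v : Int}
    (h : PySem.List.pyGet? s0 c = some (some v)) (k : Nat) :
    pvVal graph s0 (k+1) c = some v := by
  rw [pvVal, h]

-- generic Option-mapM helpers
theorem pv_mapM_some {α β : Type} (f : α → Option β) :
    ∀ (l : List α), (∀ a ∈ l, ∃ w, f a = some w) → ∃ vs, l.mapM f = some vs := by
  intro l
  induction l with
  | nil => intro _; exact ⟨[], by simp⟩
  | cons a l ih =>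
    intro h
    obtain ⟨w, hw⟩ := h a (by simp)
    obtain ⟨vs, hvs⟩ := ih (fun b hb => h b (by simp [hb]))
    exact ⟨w :: vs, by simp [List.mapM_cons, hw, hvs]⟩

theorem pv_mapM_agree {α β : Type} (f g : α → Option β) :
    ∀ (l : List α) (vs : List β), (∀ a ∈ l, ∀ w, f a = some w → g a = some w) →
      l.mapM f = some vs → l.mapM g = some vs := by
  intro l
  induction l with
  | nil => intro vs _ h; simpa using h
  | cons a l ih =>
    intro vs hag h
    rw [List.mapM_cons] at h ⊢
    cases hf : f a with
    | none => simp [hf] at h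
    | some w =>
      rw [hag a (by simp) w hf]
      simp only [hf] at h
      cases hm : l.mapM f with
      | none => simp [hm] at h
      | some ws =>
        rw [ih ws (fun b hb => hag b (by simp [hb])) hm]
        simpa [hm] using h

theorem pv_mapM_none {α β : Type} (f : α → Option β) :
    ∀ (l : List α), l.mapM f = none → ∃ a ∈ l, f a = none := by
  intro l
  induction l with
  | nil => intro h; simp at h
  | cons a l ih =>
    intro h
    rw [List.mapM_cons] at h
    cases hf : f a with
    | none => exact ⟨a, by simp, hf⟩
    | some w =>
      simp only [hf] at h
      cases hm : l.mapM f with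
      | none => obtain ⟨b, hb, hfb⟩ := ih hm; exact ⟨b, by simp [hb], hfb⟩
      | some ws => simp [hm] at h

-- existence of the semantic value on the traversed region
theorem pvVal_ex (node : Int) (graph : List (Int × List Int)) (s : List (Option Int))
    (hOK : pvOK node graph s) :
    ∀ (m : Nat) (n : Int), pvMu graph s n < m → n ∈ pvRset node graph s →
      PySem.List.pyGet? s n = some none →
      ∃ v, pvVal graph s (pvMu graph s n + 2) n = some v := by
  intro m
  induction m with
  | zero => intro n h; omega
  | succ M ih =>
    intro n hlt hR hnone
    obtain ⟨hGne, hIR, hmu⟩ := hOK.1 n hR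
    rw [show pvMu graph s n + 2 = (pvMu graph s n + 1) + 1 from rfl, pvVal, hnone]
    cases hd : pvG graph n with
    | none => exact absurd hd hGne
    | some cs =>
      cases cs with
      | nil => exact ⟨1, rfl⟩
      | cons c cs' =>
        have hch : ∀ c' ∈ (c :: cs'), c' ∈ pvCh graph n := by
          intro c' hc'; unfold pvCh; rw [hd]; simpa using hc'
        have hall : ∀ c' ∈ (c :: cs'), ∃ w, pvVal graph s (pvMu graph s n + 1) c' = some w := by
          intro c' hc'
          have hIRc := hIR c' (hch c' hc')
          cases hx : PySem.List.pyGet? s c' with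
          | none =>
            rw [PySem.List.pyGet?_eq_none_iff] at hx
            exact absurd hIRc hx
          | some o =>
            cases o with
            | some v => exact ⟨v, pvVal_preset graph s hx _⟩
            | none =>
              have hk : c' ∈ pvKids2 graph s n := pvKids2_mem graph s (hch c' hc') hx
              have hRc : c' ∈ pvRset node graph s := pvRset_closed node graph s hR hk
              have hmuc := hmu c' hk
              obtain ⟨w, hw⟩ := ih c' (by omega) hRc hx
              exact ⟨w, pvVal_mono_le graph s (by omega) hw⟩
        obtain ⟨vs, hvs⟩ := pv_mapM_some _ _ hall
        refine ⟨0 + vs.sum, ?_⟩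
        show pvPSum graph s (pvMu graph s n + 1) 0 (c :: cs') = some (0 + vs.sum)
        rw [pvPSum_eq_mapM, hvs]
        rfl

theorem pvVal_agree (node : Int) (graph : List (Int × List Int)) (s : List (Option Int))
    (hOK : pvOK node graph s) {n : Int} (hR : n ∈ pvRset node graph s)
    (hnone : PySem.List.pyGet? s n = some none)
    {f f' : Nat} (hf : pvMu graph s n + 2 ≤ f) (hf' : pvMu graph s n + 2 ≤ f') {w : Int}
    (h : pvVal graph s f n = some w) : pvVal graph s f' n = some w := by
  obtain ⟨v, hv⟩ := pvVal_ex node graph s hOK (pvMu graph s n + 1) n (by omega) hR hnone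
  have h1 := pvVal_mono_le graph s hf hv
  have h2 := pvVal_mono_le graph s hf' hv
  rw [h1] at h; injection h with h; exact h ▸ h2

-- ========== A-side: the mutated salaries list vs s0 ==========
def pvExt (node : Int) (graph : List (Int × List Int)) (s0 s : List (Option Int)) : Prop :=
  s.length = s0.length ∧ ∀ j : Nat, j < s0.length →
    s[j]? = s0[j]? ∨ (s0[j]? = some none ∧
      ∃ n ∈ pvRset node graph s0, PySem.List.pyIdx? s0.length n = some j ∧
        s[j]? = some (some ((pvVal graph s0 (pvE graph + 2) n).getD 0)))

theorem pvExt_refl (node : Int) (graph : List (Int × List Int)) (s0 : List (Option Int)) :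
    pvExt node graph s0 s0 := ⟨rfl, fun _ _ => Or.inl rfl⟩

theorem pvExt_read (node : Int) (graph : List (Int × List Int)) (s0 s : List (Option Int))
    (hOK : pvOK node graph s0) (hE : pvExt node graph s0 s) {c : Int}
    (hIR : PySem.Raise.InRange s0.length c)
    (hRS : PySem.List.pyGet? s0 c = some none → c ∈ pvRset node graph s0) :
    PySem.List.pyGet? s c = PySem.List.pyGet? s0 c ∨
    (PySem.List.pyGet? s0 c = some none ∧ c ∈ pvRset node graph s0 ∧
      PySem.List.pyGet? s c = some (some ((pvVal graph s0 (pvE graph + 2) c).getD 0))) := by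
  obtain ⟨j, hj⟩ := pvIdx_ex hIR
  have hjlt : j < s0.length := pvIdx_lt hj
  have hgets : PySem.List.pyGet? s c = s[j]? := pvGet_idx s (by rw [hE.1]; exact hj)
  have hgets0 : PySem.List.pyGet? s0 c = s0[j]? := pvGet_idx s0 hj
  rcases hE.2 j hjlt with hsame | ⟨hs0j, m, hmR, hmj, hsj⟩
  · left; rw [hgets, hsame, hgets0]
  · have hs0c : PySem.List.pyGet? s0 c = some none := by rw [hgets0, hs0j]
    have hcR : c ∈ pvRset node graph s0 := hRS hs0c
    have hcm : c = m := hOK.2 c hcR m hmR (by rw [hj, hmj])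
    refine Or.inr ⟨hs0c, hcR, ?_⟩
    rw [hgets, hsj, hcm]

theorem pvExt_set (node : Int) (graph : List (Int × List Int)) (s0 s : List (Option Int))
    {n : Int} {j : Nat} {t : Int}
    (hE : pvExt node graph s0 s) (hj : PySem.List.pyIdx? s0.length n = some j)
    (hnR : n ∈ pvRset node graph s0) (hs0j : s0[j]? = some none)
    (hv : pvVal graph s0 (pvE graph + 2) n = some t) :
    pvExt node graph s0 (s.set j (some t)) := by
  refine ⟨by simpa using hE.1, ?_⟩
  intro i hi
  by_cases hij : i = j
  · subst hij
    right
    refine ⟨hs0j, n, hnR, hj, ?_⟩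
    have hsl : s.length = s0.length := hE.1
    rw [List.getElem?_set_self (by omega), hv]
    rfl
  · rcases hE.2 i hi with h | ⟨ha, m, hmR, hmj, hb⟩
    · left; rw [List.getElem?_set_ne (by omega)]; exact h
    · right; exact ⟨ha, m, hmR, hmj, by rw [List.getElem?_set_ne (by omega)]; exact hb⟩

-- A's recursion computes pvVal and only touches region-owned cells
theorem pvCalcA_correct (node : Int) (graph : List (Int × List Int)) (s0 : List (Option Int))
    (hOK : pvOK node graph s0) :
    ∀ (fuel : Nat) (n : Int) (s : List (Option Int)),
      pvExt node graph s0 s →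
      PySem.Raise.InRange s0.length n →
      (PySem.List.pyGet? s0 n = some none → n ∈ pvRset node graph s0) →
      1 ≤ fuel →
      (PySem.List.pyGet? s0 n = some none → pvMu graph s0 n + 2 ≤ fuel) →
      ∃ v s', pvCalcA (PySem.Dict.mk graph) fuel n s = some (v, s') ∧
              pvVal graph s0 (pvE graph + 2) n = some v ∧ pvExt node graph s0 s' := by
  intro fuel
  induction fuel with
  | zero => intro n s _ _ _ h; omega
  | succ f ihf =>
    intro n s hExt hIR hRS _ hfuel
    have hlens : s.length = s0.length := hExt.1
    rcases pvExt_read node graph s0 s hOK hExt hIR hRS with hsame | ⟨hs0n, hnR, hcached⟩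
    case inr =>
      -- cached by an earlier aliased (= identical) computation
      obtain ⟨w, hw⟩ :=
        pvVal_ex node graph s0 hOK (pvMu graph s0 n + 1) n (by omega) hnR hs0n
      have hwF : pvVal graph s0 (pvE graph + 2) n = some w :=
        pvVal_mono_le graph s0 (by have := pvMu_le graph s0 n; omega) hw
      refine ⟨w, s, ?_, hwF, hExt⟩
      rw [pvCalcA, hcached, hwF]
      rfl
    case inl =>
      cases hx : PySem.List.pyGet? s0 n with
      | none =>
        rw [PySem.List.pyGet?_eq_none_iff] at hx
        exact absurd hIR hx
      | some o =>
        cases o with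
        | some v =>
          -- preset salary
          have hreads : PySem.List.pyGet? s n = some (some v) := by rw [hsame, hx]
          refine ⟨v, s, by rw [pvCalcA, hreads], ?_, hExt⟩
          rw [show pvE graph + 2 = (pvE graph + 1) + 1 from rfl]
          exact pvVal_preset graph s0 hx _
        | none =>
          have hreads : PySem.List.pyGet? s n = some none := by rw [hsame, hx]
          have hnR : n ∈ pvRset node graph s0 := hRS hx
          have hmufuel : pvMu graph s0 n + 2 ≤ f + 1 := hfuel hx
          obtain ⟨hGne, hIRch, hmu⟩ := hOK.1 n hnR
          obtain ⟨j, hj⟩ := pvIdx_ex hIR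
          have hjlt : j < s0.length := pvIdx_lt hj
          have hs0j : s0[j]? = some none := by rw [← pvGet_idx s0 hj]; exact hx
          cases hd : pvG graph n with
          | none => exact absurd hd hGne
          | some cs =>
            have hdD : PySem.Dict.get? (PySem.Dict.mk graph) n = some cs := hd
            cases cs with
            | nil =>
              have hval1 : pvVal graph s0 (pvE graph + 2) n = some 1 := by
                rw [show pvE graph + 2 = (pvE graph + 1) + 1 from rfl, pvVal, hx, hd]
              have hset1 : PySem.List.pySet? s n (some 1) = some (s.set j (some 1)) :=
                pvSet_idx s (some 1) (by rw [hlens]; exact hj)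
              refine ⟨1, s.set j (some 1), ?_, hval1, ?_⟩
              · rw [pvCalcA, hreads, hdD, hset1]
              · exact pvExt_set node graph s0 s hExt hj hnR hs0j hval1
            | cons c cs' =>
              have hch : ∀ c' ∈ (c :: cs'), c' ∈ pvCh graph n := by
                intro c' hc'; unfold pvCh; rw [hd]; simpa using hc'
              have hchild : ∀ c' ∈ (c :: cs'),
                  PySem.Raise.InRange s0.length c' ∧
                  (PySem.List.pyGet? s0 c' = some none → c' ∈ pvRset node graph s0) ∧
                  (PySem.List.pyGet? s0 c' = some none → pvMu graph s0 c' + 2 ≤ f) := by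
                intro c' hc'
                refine ⟨hIRch c' (hch c' hc'), ?_, ?_⟩
                · intro hn'
                  exact pvRset_closed node graph s0 hnR (pvKids2_mem graph s0 (hch c' hc') hn')
                · intro hn'
                  have := hmu c' (pvKids2_mem graph s0 (hch c' hc') hn')
                  omega
              -- the summing loop
              have sumthm : ∀ (l : List Int),
                  (∀ c' ∈ l, PySem.Raise.InRange s0.length c' ∧
                    (PySem.List.pyGet? s0 c' = some none → c' ∈ pvRset node graph s0) ∧
                    (PySem.List.pyGet? s0 c' = some none → pvMu graph s0 c' + 2 ≤ f)) →
                  ∀ (acc : Int) (s1 : List (Option Int)), pvExt node graph s0 s1 →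
                  ∃ vs s2, pvSumA (PySem.Dict.mk graph) f acc l s1 = some (acc + vs.sum, s2) ∧
                           l.mapM (pvVal graph s0 (pvE graph + 2)) = some vs ∧
                           pvExt node graph s0 s2 := by
                intro l
                induction l with
                | nil => intro _ acc s1 hE; exact ⟨[], s1, by simp [pvSumA], by simp, hE⟩
                | cons a l ihl =>
                  intro hall acc s1 hE
                  obtain ⟨hIRa, hRSa, hmua⟩ := hall a (by simp)
                  obtain ⟨v1, s2, hca, hval1, hE1⟩ :=
                    ihf a s1 hE hIRa hRSa (by omega) hmua
                  obtain ⟨vs, s3, hsum, hmap, hE2⟩ :=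
                    ihl (fun b hb => hall b (by simp [hb])) (acc + v1) s2 hE1
                  refine ⟨v1 :: vs, s3, ?_, ?_, hE2⟩
                  · rw [pvSumA, hca]
                    show pvSumA (PySem.Dict.mk graph) f (acc + v1) l s2 = some (acc + (v1 :: vs).sum, s3)
                    rw [hsum]
                    congr 2
                    simp
                    ring
                  · rw [List.mapM_cons, hval1, hmap]; rfl
              obtain ⟨vs, s2, hsum, hmap, hE2⟩ := sumthm (c :: cs') hchild 0 s hExt
              -- the pure value matches
              have hmap' : (c :: cs').mapM (pvVal graph s0 (pvE graph + 1)) = some vs := by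
                refine pv_mapM_agree _ _ _ _ ?_ hmap
                intro a ha w hw
                cases hxa : PySem.List.pyGet? s0 a with
                | none =>
                  rw [PySem.List.pyGet?_eq_none_iff] at hxa
                  exact absurd ((hchild a ha).1) hxa
                | some o =>
                  cases o with
                  | some v =>
                    have h1 : pvVal graph s0 (pvE graph + 2) a = some v := by
                      rw [show pvE graph + 2 = (pvE graph + 1) + 1 from rfl]
                      exact pvVal_preset graph s0 hxa _
                    rw [h1] at hw; injection hw with hw; subst hw
                    rw [show pvE graph + 1 = pvE graph + 1 from rfl]
                    have : 0 < pvE graph + 1 := by omega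
                    obtain ⟨k, hk⟩ : ∃ k, pvE graph + 1 = k + 1 := ⟨pvE graph, rfl⟩
                    rw [hk]
                    exact pvVal_preset graph s0 hxa _
                  | none =>
                    have hRa := (hchild a ha).2.1 hxa
                    have hmua : pvMu graph s0 a < pvMu graph s0 n :=
                      hmu a (pvKids2_mem graph s0 (hch a ha) hxa)
                    have hmun := pvMu_le graph s0 n
                    exact pvVal_agree node graph s0 hOK hRa hxa
                      (f := pvE graph + 2) (by have := pvMu_le graph s0 a; omega)
                      (f' := pvE graph + 1) (by omega) hw
              have hvaln : pvVal graph s0 (pvE graph + 2) n = some (0 + vs.sum) := by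
                rw [show pvE graph + 2 = (pvE graph + 1) + 1 from rfl, pvVal, hx, hd]
                show pvPSum graph s0 (pvE graph + 1) 0 (c :: cs') = some (0 + vs.sum)
                rw [pvPSum_eq_mapM, hmap']
                rfl
              have hset2 : PySem.List.pySet? s2 n (some (0 + vs.sum)) =
                  some (s2.set j (some (0 + vs.sum))) :=
                pvSet_idx s2 (some (0 + vs.sum)) (by rw [hE2.1]; exact hj)
              refine ⟨0 + vs.sum, s2.set j (some (0 + vs.sum)), ?_, hvaln, ?_⟩
              · rw [pvCalcA, hreads, hdD]
                show (match pvSumA (PySem.Dict.mk graph) f 0 (c :: cs') s with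
                      | none => none
                      | some (t, s1) =>
                        match PySem.List.pySet? s1 n (some t) with
                        | none => none
                        | some s2 => some (t, s2)) = _
                rw [hsum]
                show (match PySem.List.pySet? s2 n (some (0 + vs.sum)) with
                      | none => none
                      | some s3 => some (0 + vs.sum, s3)) = _
                rw [hset2]
              · exact pvExt_set node graph s0 s2 hE2 hj hnR hs0j hvaln

-- ========== B-side ==========
-- the inner for-loop of the worklist phase
theorem pvFold_region (s : List (Option Int)) (cs : List Int) :
    ∀ (region fr : List Int), ∃ added : List Int,
      cs.foldl (pvRegionPush s) (region, fr) = (region ++ added, added.reverse ++ fr) ∧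
      added.Nodup ∧
      (∀ c ∈ added, c ∈ cs ∧ PySem.List.pyGet? s c = some none ∧ c ∉ region) ∧
      (∀ c ∈ cs, PySem.List.pyGet? s c = some none → c ∈ region ++ added) := by
  induction cs with
  | nil => intro region fr; exact ⟨[], by simp, by simp, by simp, by simp⟩
  | cons c cs ih =>
    intro region fr
    rw [List.foldl_cons]
    by_cases hg : (PySem.List.pyGet? s c == some none) && !(region.contains c)
    · have hnone : PySem.List.pyGet? s c = some none := by
        simp only [Bool.and_eq_true] at hg; exact eq_of_beq hg.1
      have hnotin : c ∉ region := by
        simp only [Bool.and_eq_true, Bool.not_eq_true'] at hg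
        intro hc; rw [List.contains_eq_mem] at hg; simp [hc] at hg
      have hstep : pvRegionPush s (region, fr) c = (region ++ [c], c :: fr) := by
        unfold pvRegionPush; rw [if_pos hg]
      rw [hstep]
      obtain ⟨added', heq, hnd, hmem, hcov⟩ := ih (region ++ [c]) (c :: fr)
      refine ⟨c :: added', ?_, ?_, ?_, ?_⟩
      · rw [heq]
        exact Prod.ext (by simp) (by simp)
      · refine List.nodup_cons.mpr ⟨?_, hnd⟩
        intro hc
        exact (hmem c hc).2.2 (by simp)
      · intro a ha
        rcases List.mem_cons.mp ha with rfl | ha'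
        · exact ⟨by simp, hnone, hnotin⟩
        · obtain ⟨h1, h2, h3⟩ := hmem a ha'
          exact ⟨by simp [h1], h2, fun hc => h3 (by simp [hc])⟩
      · intro a ha hna
        rcases List.mem_cons.mp ha with rfl | ha'
        · simp
        · have := hcov a ha' hna
          simpa [List.append_assoc] using this
    · have hstep : pvRegionPush s (region, fr) c = (region, fr) := by
        unfold pvRegionPush; rw [if_neg hg]
      rw [hstep]
      obtain ⟨added', heq, hnd, hmem, hcov⟩ := ih region fr
      refine ⟨added', heq, hnd, ?_, ?_⟩
      · intro a ha
        obtain ⟨h1, h2, h3⟩ := hmem a ha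
        exact ⟨by simp [h1], h2, h3⟩
      · intro a ha hna
        rcases List.mem_cons.mp ha with rfl | ha'
        · -- guard failed but a is None: then a ∈ region already
          simp only [Bool.and_eq_true, Bool.not_eq_true'] at hg
          rw [Classical.not_and_iff_not_or_not] at hg
          rcases hg with h | h
          · exact absurd (by simp [hna]) h
          · have : a ∈ region := by
              by_contra hc
              exact h (by simp [List.contains_eq_mem, hc])
            simp [this]
        · exact hcov a ha' hna

-- the worklist loop terminates on a closed subregion of pvRset
theorem pvRegion_ok (node : Int) (graph : List (Int × List Int)) (s : List (Option Int))
    (hOK : pvOK node graph s) :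
    ∀ (fuel : Nat) (region frontier : List Int),
      region.Nodup →
      (∀ x ∈ region, x ∈ pvRset node graph s ∧ PySem.List.pyGet? s x = some none) →
      node ∈ region →
      frontier.Nodup →
      (∀ x ∈ frontier, x ∈ region) →
      (∀ x ∈ region, x ∉ frontier → ∀ c ∈ pvKids2 graph s x, c ∈ region) →
      frontier.length + (pvRset node graph s).card + 1 ≤ fuel + region.length →
      ∃ rg, pvRegion graph s fuel region frontier = some rg ∧
        node ∈ rg ∧
        (∀ x ∈ rg, x ∈ pvRset node graph s ∧ PySem.List.pyGet? s x = some none) ∧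
        (∀ x ∈ rg, ∀ c ∈ pvKids2 graph s x, c ∈ rg) := by
  intro fuel
  induction fuel with
  | zero =>
    intro region frontier hnd hsub _ _ _ _ hmeas
    exfalso
    have hlen : region.length ≤ (pvRset node graph s).card := by
      have h1 : region.toFinset.card = region.length := List.toFinset_card_of_nodup hnd
      have h2 : region.toFinset ⊆ pvRset node graph s := by
        intro x hx; exact (hsub x (List.mem_toFinset.mp hx)).1
      have := Finset.card_le_card h2
      omega
    omega
  | succ f ihf =>
    intro region frontier hnd hsub hnode hfnd hfsub hclosed hmeas
    cases frontier with
    | nil =>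
      refine ⟨region, rfl, hnode, hsub, ?_⟩
      intro x hx c hc
      exact hclosed x hx (by simp) c hc
    | cons n fr =>
      have hnreg : n ∈ region := hfsub n (by simp)
      have hnR : n ∈ pvRset node graph s := (hsub n hnreg).1
      obtain ⟨hGne, _, _⟩ := hOK.1 n hnR
      cases hd : pvG graph n with
      | none => exact absurd hd hGne
      | some cs =>
        obtain ⟨added, heq, hand, hamem, hacov⟩ := pvFold_region s cs region fr
        rw [show pvRegion graph s (f+1) region (n :: fr) =
              (match pvG graph n with
               | none => none
               | some cs =>
                 let st := cs.foldl (pvRegionPush s) (region, fr)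
                 pvRegion graph s f st.1 st.2) from rfl, hd]
        simp only [heq]
        have haddR : ∀ a ∈ added, a ∈ pvRset node graph s ∧ PySem.List.pyGet? s a = some none := by
          intro a ha
          obtain ⟨h1, h2, _⟩ := hamem a ha
          have hch : a ∈ pvCh graph n := by unfold pvCh; rw [hd]; simpa using h1
          exact ⟨pvRset_closed node graph s hnR (pvKids2_mem graph s hch h2), h2⟩
        have hfrnd := List.nodup_cons.mp hfnd
        apply ihf
        · rw [List.nodup_append]
          refine ⟨hnd, hand, ?_⟩
          intro a ha b hb h
          subst h
          exact (hamem a hb).2.2 ha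
        · intro x hx
          rcases List.mem_append.mp hx with h | h
          · exact hsub x h
          · exact haddR x h
        · exact List.mem_append_left _ hnode
        · rw [List.nodup_append]
          refine ⟨List.nodup_reverse.mpr hand, hfrnd.2, ?_⟩
          intro a ha b hb h
          subst h
          exact (hamem a (List.mem_reverse.mp ha)).2.2 (hfsub a (by simp [hb]))
        · intro x hx
          rcases List.mem_append.mp hx with h | h
          · exact List.mem_append_right _ (List.mem_reverse.mp h)
          · exact List.mem_append_left _ (hfsub x (by simp [h]))
        · intro x hx hnf c hc
          rcases List.mem_append.mp hx with hxr | hxa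
          · by_cases hxn : x = n
            · subst hxn
              have hcc : c ∈ cs ∧ PySem.List.pyGet? s c = some none := by
                have h1 : c ∈ pvCh graph x := List.mem_of_mem_filter hc
                unfold pvCh at h1; rw [hd] at h1
                refine ⟨by simpa using h1, ?_⟩
                have := List.of_mem_filter hc
                exact eq_of_beq this
              exact hacov c hcc.1 hcc.2
            · have hxnf : x ∉ n :: fr := by
                intro hm
                rcases List.mem_cons.mp hm with h | h
                · exact hxn h
                · exact hnf (List.mem_append_right _ h)
              exact List.mem_append_left _ (hclosed x hxr hxnf c hc)
          · exfalso
            exact hnf (List.mem_append_left _ (List.mem_reverse.mpr hxa))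
        · have := List.length_append (as := region) (bs := added)
          have := List.length_append (as := added.reverse) (bs := fr)
          simp only [List.length_append, List.length_reverse]
          simp only [List.length_cons] at hmeas
          omega

-- sweep-step characterisation
def pvNoop (graph : List (Int × List Int)) (s : List (Option Int))
    (d : PySem.Dict Int Int) (n : Int) : Prop :=
  (PySem.Dict.get? d n).isSome = true ∨ pvG graph n = none ∨
  (∃ c cs, pvG graph n = some (c :: cs) ∧ (c :: cs).mapM (pvChildVal s d) = none)

def pvStepVal (graph : List (Int × List Int)) (s : List (Option Int))
    (d : PySem.Dict Int Int) (n : Int) (t : Int) : Prop :=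
  (pvG graph n = some [] ∧ t = 1) ∨
  (∃ c cs vs, pvG graph n = some (c :: cs) ∧ (c :: cs).mapM (pvChildVal s d) = some vs ∧ t = vs.sum)

theorem pvSweepStep_cases (graph : List (Int × List Int)) (s : List (Option Int))
    (st : PySem.Dict Int Int × Bool) (n : Int) :
    (pvSweepStep graph s st n = st ∧ pvNoop graph s st.1 n) ∨
    (PySem.Dict.get? st.1 n = none ∧
      ∃ t, pvSweepStep graph s st n = (PySem.Dict.insert st.1 n t, true) ∧
           pvStepVal graph s st.1 n t) := by
  unfold pvSweepStep
  by_cases h1 : (PySem.Dict.get? st.1 n).isSome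
  · exact Or.inl ⟨by simp [h1], Or.inl (by simpa using h1)⟩
  · have hnone : PySem.Dict.get? st.1 n = none := by
      cases h : PySem.Dict.get? st.1 n with
      | none => rfl
      | some v => rw [h] at h1; simp at h1
    cases hd : pvG graph n with
    | none => exact Or.inl ⟨by simp [h1], Or.inr (Or.inl hd)⟩
    | some cs =>
      cases cs with
      | nil =>
        exact Or.inr ⟨hnone, 1, by simp [h1], Or.inl ⟨hd, rfl⟩⟩
      | cons c cs' =>
        cases hm : (c :: cs').mapM (pvChildVal s st.1) with
        | none => exact Or.inl ⟨by simp [h1, hm], Or.inr (Or.inr ⟨c, cs', hd, hm⟩)⟩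
        | some vs =>
          exact Or.inr ⟨hnone, vs.sum, by simp [h1, hm], Or.inr ⟨c, cs', vs, hd, hm, rfl⟩⟩

-- a step-produced value IS the semantic value
theorem pvStepVal_val (node : Int) (graph : List (Int × List Int)) (s : List (Option Int))
    (hOK : pvOK node graph s) {rg : List Int}
    (hrg : ∀ x ∈ rg, x ∈ pvRset node graph s ∧ PySem.List.pyGet? s x = some none)
    {d : PySem.Dict Int Int}
    (hIv : ∀ k v, PySem.Dict.get? d k = some v → pvVal graph s (pvE graph + 2) k = some v)
    {n : Int} (hn : n ∈ rg) {t : Int} (hSV : pvStepVal graph s d n t) :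
    pvVal graph s (pvE graph + 2) n = some t := by
  obtain ⟨hnR, hnone⟩ := hrg n hn
  obtain ⟨hGne, hIRch, hmu⟩ := hOK.1 n hnR
  rcases hSV with ⟨hd, rfl⟩ | ⟨c, cs, vs, hd, hm, rfl⟩
  · rw [show pvE graph + 2 = (pvE graph + 1) + 1 from rfl, pvVal, hnone, hd]
  · have hch : ∀ c' ∈ (c :: cs), c' ∈ pvCh graph n := by
      intro c' hc'; unfold pvCh; rw [hd]; simpa using hc'
    have hmap' : (c :: cs).mapM (pvVal graph s (pvE graph + 1)) = some vs := by
      refine pv_mapM_agree _ _ _ _ ?_ hm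
      intro a ha w hw
      unfold pvChildVal at hw
      cases hxa : PySem.List.pyGet? s a with
      | none => rw [hxa] at hw; exact absurd hw (by simp)
      | some o =>
        cases o with
        | some v =>
          rw [hxa] at hw; injection hw with hw; subst hw
          obtain ⟨k, hk⟩ : ∃ k, pvE graph + 1 = k + 1 := ⟨pvE graph, rfl⟩
          rw [hk]
          exact pvVal_preset graph s hxa _
        | none =>
          rw [hxa] at hw
          have hkid : a ∈ pvKids2 graph s n := pvKids2_mem graph s (hch a ha) hxa
          have haR : a ∈ pvRset node graph s := pvRset_closed node graph s hnR hkid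
          have hmua := hmu a hkid
          have hmun := pvMu_le graph s n
          exact pvVal_agree node graph s hOK haR hxa
            (f := pvE graph + 2) (by have := pvMu_le graph s a; omega)
            (f' := pvE graph + 1) (by omega) (hIv a w hw)
    rw [show pvE graph + 2 = (pvE graph + 1) + 1 from rfl, pvVal, hnone, hd]
    show pvPSum graph s (pvE graph + 1) 0 (c :: cs) = some vs.sum
    rw [pvPSum_eq_mapM, hmap']
    simp

-- invariants through one full sweep
theorem pvSweep_fold (node : Int) (graph : List (Int × List Int)) (s : List (Option Int))
    (hOK : pvOK node graph s) {rg : List Int}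
    (hrg : ∀ x ∈ rg, x ∈ pvRset node graph s ∧ PySem.List.pyGet? s x = some none)
    (d : PySem.Dict Int Int) :
    ∀ (l : List Int), (∀ x ∈ l, x ∈ rg) →
    ∀ (st : PySem.Dict Int Int × Bool),
      (∀ k v, PySem.Dict.get? st.1 k = some v → pvVal graph s (pvE graph + 2) k = some v) →
      (∀ k ∈ st.1.keys, k ∈ rg) → st.1.keys.Nodup →
      d.size ≤ st.1.size → (st.2 = false → st.1 = d) → (st.2 = true → d.size < st.1.size) →
      (let r := l.foldl (pvSweepStep graph s) st
       (∀ k v, PySem.Dict.get? r.1 k = some v → pvVal graph s (pvE graph + 2) k = some v) ∧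
       (∀ k ∈ r.1.keys, k ∈ rg) ∧ r.1.keys.Nodup ∧
       d.size ≤ r.1.size ∧ (r.2 = false → r.1 = d) ∧ (r.2 = true → d.size < r.1.size)) := by
  intro l
  induction l with
  | nil => intro _ st h1 h2 h3 h4 h5 h6; exact ⟨h1, h2, h3, h4, h5, h6⟩
  | cons a l ihl =>
    intro hsub st h1 h2 h3 h4 h5 h6
    have harg : a ∈ rg := hsub a (by simp)
    simp only [List.foldl_cons]
    rcases pvSweepStep_cases graph s st a with ⟨he, _⟩ | ⟨hnone, t, he, hSV⟩
    · rw [he]; exact ihl (fun x hx => hsub x (by simp [hx])) st h1 h2 h3 h4 h5 h6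
    · have hval := pvStepVal_val node graph s hOK hrg h1 harg hSV
      rw [he]
      have hsize : (PySem.Dict.insert st.1 a t).size = st.1.size + 1 := by
        rw [PySem.Dict.size_insert]
        have : st.1.contains a = false := by
          rw [PySem.Dict.contains_eq_isSome_get?, hnone]; rfl
        simp [this]
      refine ihl (fun x hx => hsub x (by simp [hx])) _ ?_ ?_ ?_ ?_ ?_ ?_
      · intro k v hkv
        rw [PySem.Dict.get?_insert] at hkv
        split_ifs at hkv with hk
        · subst hk; injection hkv with hkv; exact hkv ▸ hval
        · exact h1 k v hkv
      · intro k hk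
        rcases (PySem.Dict.mem_keys_insert _ _ _ _).mp hk with rfl | hk'
        · exact harg
        · exact h2 k hk'
      · exact PySem.Dict.nodup_keys_insert _ _ _ h3
      · simp only [hsize]; omega
      · intro h; exact absurd h (by simp)
      · intro _; simp only [hsize]; omega

theorem pvSweep_mono_true (graph : List (Int × List Int)) (s : List (Option Int)) :
    ∀ (l : List Int) (st : PySem.Dict Int Int × Bool), st.2 = true →
      (l.foldl (pvSweepStep graph s) st).2 = true := by
  intro l
  induction l with
  | nil => intro st h; exact h
  | cons a l ihl =>
    intro st h
    rw [List.foldl_cons]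
    apply ihl
    rcases pvSweepStep_cases graph s st a with ⟨he, _⟩ | ⟨_, t, he, _⟩ <;> simp [he, h]

theorem pvSweep_fold_false (graph : List (Int × List Int)) (s : List (Option Int)) :
    ∀ (l : List Int) (st : PySem.Dict Int Int × Bool),
      (l.foldl (pvSweepStep graph s) st).2 = false →
      (l.foldl (pvSweepStep graph s) st) = st ∧ ∀ x ∈ l, pvNoop graph s st.1 x := by
  intro l
  induction l with
  | nil => intro st h; exact ⟨rfl, by simp⟩
  | cons a l ihl =>
    intro st h
    rw [List.foldl_cons] at h ⊢
    rcases pvSweepStep_cases graph s st a with ⟨he, hnoop⟩ | ⟨_, t, he, _⟩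
    · rw [he] at h ⊢
      obtain ⟨h1, h2⟩ := ihl st h
      refine ⟨h1, ?_⟩
      intro x hx
      rcases List.mem_cons.mp hx with rfl | hx'
      · exact hnoop
      · exact h2 x hx'
    · exfalso
      have he2 : (pvSweepStep graph s st a).2 = true := by simp [he]
      have hm := pvSweep_mono_true graph s l _ he2
      rw [hm] at h
      exact absurd h (by simp)

-- if a full sweep changes nothing, every region node is already valued
theorem pvComplete (node : Int) (graph : List (Int × List Int)) (s : List (Option Int))
    (hOK : pvOK node graph s) {rg : List Int}
    (hrg : ∀ x ∈ rg, x ∈ pvRset node graph s ∧ PySem.List.pyGet? s x = some none)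
    (hcl : ∀ x ∈ rg, ∀ c ∈ pvKids2 graph s x, c ∈ rg)
    (d : PySem.Dict Int Int) (hnoop : ∀ x ∈ rg, pvNoop graph s d x) :
    ∀ (m : Nat) (x : Int), x ∈ rg → pvMu graph s x < m → (PySem.Dict.get? d x).isSome = true := by
  intro m
  induction m with
  | zero => intro x _ h; omega
  | succ M ih =>
    intro x hx hm
    obtain ⟨hxR, hxnone⟩ := hrg x hx
    obtain ⟨hGne, hIRch, hmu⟩ := hOK.1 x hxR
    rcases hnoop x hx with h | h | ⟨c, cs, hd, hmap⟩
    · exact h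
    · exact absurd h hGne
    · exfalso
      obtain ⟨a, ha, hanone⟩ := pv_mapM_none _ _ hmap
      have hch : a ∈ pvCh graph x := by unfold pvCh; rw [hd]; simpa using ha
      unfold pvChildVal at hanone
      cases hxa : PySem.List.pyGet? s a with
      | none =>
        rw [PySem.List.pyGet?_eq_none_iff] at hxa
        exact absurd (hIRch a hch) hxa
      | some o =>
        cases o with
        | some v => rw [hxa] at hanone; simp at hanone
        | none =>
          rw [hxa] at hanone
          simp only [] at hanone
          have hkid : a ∈ pvKids2 graph s x := pvKids2_mem graph s hch hxa
          have harg : a ∈ rg := hcl x hx a hkid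
          have hmua := hmu a hkid
          have := ih a harg (by omega)
          rw [hanone] at this
          exact absurd this (by simp)

theorem pvLoopB_correct (node : Int) (graph : List (Int × List Int)) (s : List (Option Int))
    (hOK : pvOK node graph s) {rg : List Int}
    (hrg : ∀ x ∈ rg, x ∈ pvRset node graph s ∧ PySem.List.pyGet? s x = some none)
    (hcl : ∀ x ∈ rg, ∀ c ∈ pvKids2 graph s x, c ∈ rg) :
    ∀ (f : Nat) (d : PySem.Dict Int Int),
      (∀ k v, PySem.Dict.get? d k = some v → pvVal graph s (pvE graph + 2) k = some v) →
      (∀ k ∈ d.keys, k ∈ rg) → d.keys.Nodup →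
      rg.length < f + d.size →
      (∀ k v, PySem.Dict.get? (pvLoopB graph s rg f d) k = some v →
         pvVal graph s (pvE graph + 2) k = some v) ∧
      ∀ x ∈ rg, ∃ w, PySem.Dict.get? (pvLoopB graph s rg f d) x = some w := by
  intro f
  induction f with
  | zero =>
    intro d _ hK hnd hbound
    exfalso
    have h1 : d.keys.length = d.size := by
      simp [PySem.Dict.keys, PySem.Dict.size]
    have h2 := (List.Nodup.subperm hnd (fun k hk => hK k hk)).length_le
    omega
  | succ F ihf =>
    intro d hIv hK hnd hbound
    have hfold := pvSweep_fold node graph s hOK hrg d rg (fun _ h => h) (d, false) hIv hK hnd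
      (le_refl _) (fun _ => rfl) (by intro h; cases h)
    cases hsw : rg.foldl (pvSweepStep graph s) (d, false) with
    | mk d1 ch =>
      rw [hsw] at hfold
      obtain ⟨hIv1, hK1, hnd1, hle, hfalse, htrue⟩ := hfold
      cases ch with
      | false =>
        have hd1 : d1 = d := hfalse rfl
        have hres : pvLoopB graph s rg (F+1) d = d1 := by rw [pvLoopB, hsw]
        obtain ⟨_, hnoop⟩ := pvSweep_fold_false graph s rg (d, false) (by rw [hsw])
        rw [hres, hd1]
        refine ⟨hIv, ?_⟩
        intro x hx
        have hsome := pvComplete node graph s hOK hrg hcl d hnoop (pvMu graph s x + 1) x hx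
          (by omega)
        cases hg : PySem.Dict.get? d x with
        | none => rw [hg] at hsome; exact absurd hsome (by simp)
        | some w => exact ⟨w, rfl⟩
      | true =>
        have hres : pvLoopB graph s rg (F+1) d = pvLoopB graph s rg F d1 := by
          rw [pvLoopB, hsw]
        rw [hres]
        exact ihf d1 hIv1 hK1 hnd1 (by have h := htrue rfl; simp at h; omega)

theorem pvAlt_correct (node : Int) (graph : List (Int × List Int)) (s : List (Option Int))
    (hOK : pvOK node graph s) (hs0 : PySem.List.pyGet? s node = some none) {v : Int}
    (hv : pvVal graph s (pvE graph + 2) node = some v) :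
    calculate_salary_alt node graph s = v := by
  unfold calculate_salary_alt
  rw [hs0]
  obtain ⟨rg, hreg, hnodein, hrg, hcl⟩ :=
    pvRegion_ok node graph s hOK (pvE graph + 2) [node] [node]
      (by simp)
      (by intro x hx
          rw [List.mem_singleton] at hx
          rw [hx]
          exact ⟨pvRset_self node graph s, hs0⟩)
      (by simp) (by simp) (by simp)
      (by intro x hx hnx; rw [List.mem_singleton] at hx; exact absurd (by simp [hx]) hnx)
      (by have := pvRset_card node graph s; simp only [List.length_cons, List.length_nil]; omega)
  show (match pvRegion graph s (pvE graph + 2) [node] [node] with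
        | none => 0
        | some region =>
          (PySem.Dict.get? (pvLoopB graph s region (region.length + 1) PySem.Dict.empty) node).getD 0) = v
  rw [hreg]
  show (PySem.Dict.get? (pvLoopB graph s rg (rg.length + 1) PySem.Dict.empty) node).getD 0 = v
  obtain ⟨hIvr, hall⟩ := pvLoopB_correct node graph s hOK hrg hcl (rg.length + 1)
    PySem.Dict.empty
    (by intro k v h; rw [PySem.Dict.get?_empty] at h; exact absurd h (by simp))
    (by intro k hk; simp [PySem.Dict.keys_empty] at hk)
    (by simp [PySem.Dict.keys_empty])
    (by omega)
  obtain ⟨w, hw⟩ := hall node hnodein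
  have hvw := hIvr node w hw
  rw [hv] at hvw
  injection hvw with hvw
  rw [hw]
  simpa using hvw.symm

-- ===== VERDICT (by name: the statement is the Claim_ definition above) =====
theorem calculate_salary_spec : Claim_equal_calculate_salary := by
  unfold Claim_equal_calculate_salary
  intro node graph salaries _ hPre
  unfold Spec_calculate_salary
  obtain ⟨hIR, himp⟩ := hPre
  cases hx : PySem.List.pyGet? salaries node with
  | none =>
    rw [PySem.List.pyGet?_eq_none_iff] at hx
    exact absurd hIR hx
  | some o =>
    cases o with
    | some v =>
      unfold calculate_salary calculate_salary_alt
      rw [show pvE graph + 2 = (pvE graph + 1) + 1 from rfl, pvCalcA, hx]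
    | none =>
      have hOK : pvOK node graph salaries := himp hx
      obtain ⟨v, s', hca, hval, _⟩ := pvCalcA_correct node graph salaries hOK
        (pvE graph + 2) node salaries (pvExt_refl node graph salaries) hIR
        (fun _ => pvRset_self node graph salaries) (by omega)
        (by intro _; have := pvMu_le graph salaries node; omega)
      have hb := pvAlt_correct node graph salaries hOK hx hval
      unfold calculate_salary
      rw [hca, hb]
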